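-- pv_equiv track=rewrite | github.com/thaheer-uzamaki/Code | Letter capital.py | letter_capitalization
-- ===== SOURCE A (Python) =====
-- def letter_capitalization(string):
--     res=string.title()
--     token='abcd'
--     result=''
--     for char in res:
--         if char in token:
--             result+=f'--{char}--'
--         else:
--             result+=char
--     return result
-- ===== SOURCE B (Python) =====
-- def letter_capitalization(string):
--     res = string.title()
--     return (res.replace('a', '--a--')
--                .replace('b', '--b--')
--                .replace('c', '--c--')
--                .replace('d', '--d--'))
-- ===== Notes on version B (the rewrite author's own statement) =====
-- stated objective: idiomatic
-- what changed: Replaces A's single character-by-character loop (membership test in 'abcd' plus string accumulation) with one title() call followed by four chained str.replace passes, one per wrapped letter.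
import Mathlib
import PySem

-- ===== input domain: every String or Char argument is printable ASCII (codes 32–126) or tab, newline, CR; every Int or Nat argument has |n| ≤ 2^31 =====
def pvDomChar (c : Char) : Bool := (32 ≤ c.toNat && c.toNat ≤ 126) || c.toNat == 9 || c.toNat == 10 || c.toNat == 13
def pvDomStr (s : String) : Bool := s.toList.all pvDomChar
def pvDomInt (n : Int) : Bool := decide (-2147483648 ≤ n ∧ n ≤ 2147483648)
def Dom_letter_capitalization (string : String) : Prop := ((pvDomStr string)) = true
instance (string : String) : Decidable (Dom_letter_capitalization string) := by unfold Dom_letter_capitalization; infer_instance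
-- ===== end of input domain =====

-- B replaces A's single character loop (membership test + string accumulation) by one
-- title() pass followed by four chained str.replace passes, one per wrapped letter (idiomatic).

-- ===== PORT A =====
-- hand port of Python's str.title() (PySem has no title); exact on the ASCII domain Dom_:
-- an alphabetic char is uppercased after a non-alphabetic (or at the start), lowercased otherwise.
def pyTitleGo : Bool → List Char → List Char
  | _, [] => []
  | prevAlpha, c :: t =>
    if PySem.Chars.isalpha c then
      (if prevAlpha then PySem.Chars.lowerChar c else PySem.Chars.upperChar c) :: pyTitleGo true t
    else
      c :: pyTitleGo false t

def pyTitle (cs : List Char) : List Char := pyTitleGo false cs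

def letter_capitalization (string : String) : String :=
  let res := pyTitle string.toList
  let token := "abcd".toList
  String.mk (res.foldl
    (fun result char =>
      result ++ (if PySem.Chars.isIn [char] token then ['-','-'] ++ [char] ++ ['-','-'] else [char]))
    [])

-- ===== PORT B =====
def letter_capitalization_alt (string : String) : String :=
  let res := pyTitle string.toList
  String.mk
    (PySem.Chars.replace
      (PySem.Chars.replace
        (PySem.Chars.replace
          (PySem.Chars.replace res ['a'] ['-','-','a','-','-'])
          ['b'] ['-','-','b','-','-'])
        ['c'] ['-','-','c','-','-'])
      ['d'] ['-','-','d','-','-'])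

-- ===== PRECONDITION & SPEC =====
def Spec_letter_capitalization (string : String) (out : String) : Prop := out = letter_capitalization_alt string
instance (string : String) (out : String) : Decidable (Spec_letter_capitalization string out) := by unfold Spec_letter_capitalization; infer_instance

-- ===== CLAIM (what is proved, stated in full; the proofs are below) =====
def Claim_equal_letter_capitalization : Prop := ∀ (string : String), Dom_letter_capitalization string → Spec_letter_capitalization string (letter_capitalization string)

-- ===== LEMMAS AND PROOFS =====

-- replace with a single-character pattern is a per-character flatMap
theorem replace_go_singleton (x : Char) (new : List Char) :
    ∀ (fuel : Nat) (l acc : List Char), l.length ≤ fuel →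
      PySem.Chars.replace.go [x] new fuel l acc
        = acc.reverse ++ l.flatMap (fun c => if c = x then new else [c]) := by
  intro fuel
  induction fuel with
  | zero =>
    intro l acc h
    have : l = [] := List.eq_nil_of_length_eq_zero (Nat.le_zero.mp h)
    subst this
    simp [PySem.Chars.replace.go]
  | succ n ih =>
    intro l acc h
    cases l with
    | nil => simp [PySem.Chars.replace.go]
    | cons c t =>
      simp only [PySem.Chars.replace.go]
      by_cases hc : c = x
      · subst hc
        have hpre : List.isPrefixOf [c] (c :: t) = true := by
          simp [List.isPrefixOf]
        rw [if_pos hpre]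
        have := ih t (new.reverse ++ acc) (by simpa using Nat.le_of_succ_le_succ h)
        simpa [List.flatMap_cons] using this
      · have hpre : List.isPrefixOf [x] (c :: t) = false := by
          simp [List.isPrefixOf]
          exact fun hxc => absurd hxc.symm hc
        rw [if_neg (by simp [hpre])]
        have := ih t (c :: acc) (by simpa using Nat.le_of_succ_le_succ h)
        simpa [List.flatMap_cons, hc] using this

theorem replace_singleton (t : List Char) (x : Char) (new : List Char) :
    PySem.Chars.replace t [x] new = t.flatMap (fun c => if c = x then new else [c]) := by
  unfold PySem.Chars.replace
  rw [if_neg (by simp)]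
  simpa using replace_go_singleton x new t.length t [] (le_refl _)

theorem singleton_infix_iff_mem (c : Char) (l : List Char) : [c] <:+: l ↔ c ∈ l := by
  constructor
  · intro h; exact h.mem (by simp)
  · intro h
    obtain ⟨s, u, rfl⟩ := List.append_of_mem h
    exact ⟨s, u, by simp⟩

theorem isIn_singleton (c : Char) (l : List Char) :
    PySem.Chars.isIn [c] l = l.contains c := by
  by_cases h : c ∈ l
  · rw [(PySem.Chars.isIn_iff_infix _ _).mpr ((singleton_infix_iff_mem c l).mpr h)]
    simp [h]
  · rw [(PySem.Chars.isIn_eq_false_iff _ _).mpr (fun hi => h ((singleton_infix_iff_mem c l).mp hi))]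
    simp [h]

-- per-character agreement of the two wrapping strategies
theorem wrap_char_eq (c : Char) :
    ((if c = 'a' then ['-','-','a','-','-'] else [c]).flatMap (fun x =>
      (if x = 'b' then ['-','-','b','-','-'] else [x]).flatMap (fun x =>
        (if x = 'c' then ['-','-','c','-','-'] else [x]).flatMap (fun c =>
          if c = 'd' then ['-','-','d','-','-'] else [c]))))
      = (if PySem.Chars.isIn [c] "abcd".toList then ['-','-'] ++ [c] ++ ['-','-'] else [c]) := by
  rw [isIn_singleton]
  by_cases ha : c = 'a'
  · subst ha; decide
  · by_cases hb : c = 'b'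
    · subst hb; decide
    · by_cases hc : c = 'c'
      · subst hc; decide
      · by_cases hd : c = 'd'
        · subst hd; decide
        · simp [ha, hb, hc, hd]

-- ===== VERDICT (by name: the statement is the Claim_ definition above) =====
theorem letter_capitalization_spec : Claim_equal_letter_capitalization := by
  intro string _
  unfold Spec_letter_capitalization letter_capitalization letter_capitalization_alt
  simp only [replace_singleton, List.flatMap_assoc,
    PySem.List.foldl_append_eq_flatMap, List.nil_append]
  congr 1
  exact List.flatMap_congr (fun c _ => (wrap_char_eq c).symm)
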